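-- pv_equiv track=rewrite | github.com/nikitacs16/nlg-eval | nlgeval/pycocoevalcap/answerability/answerability_scorer.py | remove_stopwords_and_NER_line
-- ===== SOURCE A (Python) =====
-- stop_words = {"did", "have", "ourselves", "hers", "between", "yourself",
--               "but", "again", "there", "about", "once", "during", "out", "very",
--               "having", "with", "they", "own", "an", "be", "some", "for", "do", "its",
--               "yours", "such", "into", "of", "most", "itself", "other", "off", "is", "s",
--               "am", "or", "as", "from", "him", "each", "the", "themselves", "until", "below",
--               "are", "we", "these", "your", "his", "through", "don", "nor", "me", "were",
--               "her", "more", "himself", "this", "down", "should", "our", "their", "while",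
--               "above", "both", "up", "to", "ours", "had", "she", "all", "no", "at", "any",
--               "before", "them", "same", "and", "been", "have", "in", "will", "on", "does",
--               "yourselves", "then", "that", "because", "over", "so", "can", "not", "now", "under",
--               "he", "you", "herself", "has", "just", "too", "only", "myself", "those", "i", "after",
--               "few", "t", "being", "if", "theirs", "my", "against", "a", "by", "doing", "it", "further",
--               "was", "here", "than"}
--
-- question_words_global = {'What', 'Which', 'Why', 'Who', 'Whom', 'Whose', 'Where', 'When', 'How', 'Is'}
--
-- def remove_stopwords_and_NER_line(question, relevant_words=None, question_words=None):
--     if relevant_words is None: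
--
--         question = question.split()
--         if question_words is None:
--            question_words = question_words_global
--
--         temp_words = []
--         for word in question_words:
--             for i, w in enumerate(question):
--                 if w == word:
--                     temp_words.append(w)
--                     # If the question type is 'what' or 'which' the following word is generally associated with
--                     # with the answer type. Thus it is important that it is considered a part of the question.
--                     if i+1 < len(question) and (w.lower() == "what" or w.lower() == "which"):
--                         temp_words.append(question[i+1])
--
--         question_split = [item for item in question if item not in temp_words]
--         ner_words = question_split
--         temp_words = []
--
--         for i in ner_words:
--             if i[0].isupper() == False:
--                 if i not in stop_words :
--                     temp_words.append(i)
--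
--         return " ".join(temp_words)
--     else:
--         question_words = question.split()
--         temp_words = []
--         for i in question_words:
--             for j in relevant_words:
--                 if j.lower() in i:
--                     temp_words.append(i)
--         return " ".join(temp_words)
-- ===== SOURCE B (Python) =====
-- stop_words = {"did", "have", "ourselves", "hers", "between", "yourself",
--               "but", "again", "there", "about", "once", "during", "out", "very",
--               "having", "with", "they", "own", "an", "be", "some", "for", "do", "its",
--               "yours", "such", "into", "of", "most", "itself", "other", "off", "is", "s",
--               "am", "or", "as", "from", "him", "each", "the", "themselves", "until", "below",
--               "are", "we", "these", "your", "his", "through", "don", "nor", "me", "were",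
--               "her", "more", "himself", "this", "down", "should", "our", "their", "while",
--               "above", "both", "up", "to", "ours", "had", "she", "all", "no", "at", "any",
--               "before", "them", "same", "and", "been", "have", "in", "will", "on", "does",
--               "yourselves", "then", "that", "because", "over", "so", "can", "not", "now", "under",
--               "he", "you", "herself", "has", "just", "too", "only", "myself", "those", "i", "after",
--               "few", "t", "being", "if", "theirs", "my", "against", "a", "by", "doing", "it", "further",
--               "was", "here", "than"}
--
-- question_words_global = {'What', 'Which', 'Why', 'Who', 'Whom', 'Whose', 'Where', 'When', 'How', 'Is'}
--
-- def remove_stopwords_and_NER_line(question, relevant_words=None, question_words=None):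
--     if relevant_words is None:
--         words = question.split()
--         qws = question_words_global if question_words is None else question_words
--         # one pass over the question: collect all removal WORDS (question words
--         # and the follower of every 'what'/'which' question word)
--         to_remove = set()
--         for i, w in enumerate(words):
--             if w in qws:
--                 to_remove.add(w)
--                 if i + 1 < len(words) and w.lower() in ("what", "which"):
--                     to_remove.add(words[i + 1])
--         # single combined filter pass
--         return " ".join(w for w in words
--                         if w not in to_remove
--                         and not w[0].isupper()
--                         and w not in stop_words)
--     else:
--         return " ".join(w for w in question.split()
--                         for j in relevant_words
--                         if j.lower() in w)
-- ===== Notes on version B (the rewrite author's own statement) =====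
-- stated objective: simpler
-- what changed: B replaces A's two-phase question-word scan (outer loop over the question-word set with an inner enumerate scan, then a list-filter, then a second stopword/capitalization loop) by a single enumerate pass that builds a removal set and one combined filter comprehension; the else branch becomes a single comprehension.
import Mathlib
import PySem

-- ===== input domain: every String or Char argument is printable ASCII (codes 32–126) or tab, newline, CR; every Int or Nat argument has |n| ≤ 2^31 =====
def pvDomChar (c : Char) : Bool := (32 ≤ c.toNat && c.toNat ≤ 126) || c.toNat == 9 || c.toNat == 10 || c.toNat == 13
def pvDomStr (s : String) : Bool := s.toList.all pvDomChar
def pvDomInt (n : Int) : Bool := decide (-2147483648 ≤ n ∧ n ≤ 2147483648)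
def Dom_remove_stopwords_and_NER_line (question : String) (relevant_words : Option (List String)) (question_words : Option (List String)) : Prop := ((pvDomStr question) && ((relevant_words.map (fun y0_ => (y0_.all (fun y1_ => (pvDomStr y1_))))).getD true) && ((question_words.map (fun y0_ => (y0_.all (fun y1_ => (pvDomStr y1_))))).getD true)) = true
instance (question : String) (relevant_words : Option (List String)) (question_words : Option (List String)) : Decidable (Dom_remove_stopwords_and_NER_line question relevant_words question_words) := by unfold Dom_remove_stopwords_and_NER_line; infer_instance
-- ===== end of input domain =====

-- B merges A's two filter passes into one comprehension over a removal set built in a single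
-- pass over the question (objective: simpler; same asymptotic cost).

-- the module-level set literals (Python sets used only for membership: a distinct list is exact)
def pvStopWords : List String := ["did", "have", "ourselves", "hers", "between", "yourself",
  "but", "again", "there", "about", "once", "during", "out", "very",
  "having", "with", "they", "own", "an", "be", "some", "for", "do", "its",
  "yours", "such", "into", "of", "most", "itself", "other", "off", "is", "s",
  "am", "or", "as", "from", "him", "each", "the", "themselves", "until", "below",
  "are", "we", "these", "your", "his", "through", "don", "nor", "me", "were",
  "her", "more", "himself", "this", "down", "should", "our", "their", "while",
  "above", "both", "up", "to", "ours", "had", "she", "all", "no", "at", "any",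
  "before", "them", "same", "and", "been", "in", "will", "on", "does",
  "yourselves", "then", "that", "because", "over", "so", "can", "not", "now", "under",
  "he", "you", "herself", "has", "just", "too", "only", "myself", "those", "i", "after",
  "few", "t", "being", "if", "theirs", "my", "against", "a", "by", "doing", "it", "further",
  "was", "here", "than"]

def pvQuestionWordsGlobal : List String := ["What", "Which", "Why", "Who", "Whom", "Whose", "Where", "When", "How", "Is"]

-- ===== PORT A =====
def remove_stopwords_and_NER_line (question : String) (relevant_words : Option (List String)) (question_words : Option (List String)) : String :=
  match relevant_words with
  | none =>
    let q := PySem.Str.split₀ question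
    let qws := match question_words with
      | none => pvQuestionWordsGlobal
      | some l => l
    let temp_words := qws.foldl (fun acc word =>
      (PySem.List.enumerate q).foldl (fun acc2 iw =>
        if iw.2 == word then
          let acc3 := acc2 ++ [iw.2]
          if iw.1 + 1 < (q.length : Int) && (PySem.Str.lower iw.2 == "what" || PySem.Str.lower iw.2 == "which") then
            -- question[i+1]: in range by the guard, so the default of pyGetD is never used
            acc3 ++ [PySem.List.pyGetD q (iw.1 + 1) ""]
          else acc3
        else acc2) acc) []
    let question_split := q.filter (fun item => !(temp_words.contains item))
    let temp2 := question_split.foldl (fun acc i =>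
      -- i[0].isupper(): words from split() are nonempty, so headD's default is never used
      if (PySem.Chars.isupper (i.toList.headD ' ')) == false then
        if !(pvStopWords.contains i) then acc ++ [i] else acc
      else acc) []
    PySem.Str.join " " temp2
  | some rw =>
    let qw := PySem.Str.split₀ question
    let temp := qw.foldl (fun acc i =>
      rw.foldl (fun acc2 j => if PySem.Str.isIn (PySem.Str.lower j) i then acc2 ++ [i] else acc2) acc) []
    PySem.Str.join " " temp

-- ===== PORT B =====
def remove_stopwords_and_NER_line_alt (question : String) (relevant_words : Option (List String)) (question_words : Option (List String)) : String :=
  match relevant_words with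
  | none =>
    let words := PySem.Str.split₀ question
    let qws := match question_words with
      | none => pvQuestionWordsGlobal
      | some l => l
    let to_remove := (PySem.List.enumerate words).foldl (fun s iw =>
      if qws.contains iw.2 then
        let s1 := PySem.Set.add s iw.2
        if iw.1 + 1 < (words.length : Int) && (PySem.Str.lower iw.2 == "what" || PySem.Str.lower iw.2 == "which") then
          -- words[i+1]: in range by the guard, so the default of pyGetD is never used
          PySem.Set.add s1 (PySem.List.pyGetD words (iw.1 + 1) "")
        else s1
      else s) PySem.Set.empty
    PySem.Str.join " " (words.filter (fun w =>
      !(PySem.Set.contains to_remove w) &&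
      -- w[0].isupper(): words from split() are nonempty, so headD's default is never used
      !(PySem.Chars.isupper (w.toList.headD ' ')) &&
      !(pvStopWords.contains w)))
  | some rw =>
    PySem.Str.join " " ((PySem.Str.split₀ question).flatMap (fun w =>
      (rw.filter (fun j => PySem.Str.isIn (PySem.Str.lower j) w)).map (fun _ => w)))

-- ===== PRECONDITION & SPEC =====
def Spec_remove_stopwords_and_NER_line (question : String) (relevant_words : Option (List String)) (question_words : Option (List String)) (out : String) : Prop := out = remove_stopwords_and_NER_line_alt question relevant_words question_words
instance (question : String) (relevant_words : Option (List String)) (question_words : Option (List String)) (out : String) : Decidable (Spec_remove_stopwords_and_NER_line question relevant_words question_words out) := by unfold Spec_remove_stopwords_and_NER_line; infer_instance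

-- ===== CLAIM (what is proved, stated in full; the proofs are below) =====
def Claim_equal_remove_stopwords_and_NER_line : Prop := ∀ (question : String) (relevant_words : Option (List String)) (question_words : Option (List String)), Dom_remove_stopwords_and_NER_line question relevant_words question_words → Spec_remove_stopwords_and_NER_line question relevant_words question_words (remove_stopwords_and_NER_line question relevant_words question_words)

-- ===== LEMMAS AND PROOFS =====

-- the "follower" side condition used by both loops
def pvQ (q : List String) (iw : Int × String) (x : String) : Prop :=
  x = iw.2 ∨ ((iw.1 + 1 < (q.length : Int) && (PySem.Str.lower iw.2 == "what" || PySem.Str.lower iw.2 == "which")) = true ∧ x = PySem.List.pyGetD q (iw.1 + 1) "")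

-- membership in A's temp_words after the inner enumerate-loop
lemma pv_memInnerA (q : List String) (word x : String) (l : List (Int × String)) (acc : List String) :
    (x ∈ l.foldl (fun acc2 iw =>
        if iw.2 == word then
          let acc3 := acc2 ++ [iw.2]
          if iw.1 + 1 < (q.length : Int) && (PySem.Str.lower iw.2 == "what" || PySem.Str.lower iw.2 == "which") then
            acc3 ++ [PySem.List.pyGetD q (iw.1 + 1) ""]
          else acc3
        else acc2) acc)
    ↔ x ∈ acc ∨ ∃ iw ∈ l, iw.2 = word ∧ pvQ q iw x := by
  induction l generalizing acc with
  | nil => simp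
  | cons hd tl ih =>
    simp only [List.foldl_cons]
    split_ifs with h1 h2
    · rw [ih]
      simp only [List.mem_append, List.not_mem_nil, or_false, List.mem_cons, pvQ]
      constructor
      · rintro (((h | h) | h) | ⟨iw, hiw, he, hq⟩)
        · exact Or.inl h
        · exact Or.inr ⟨hd, Or.inl rfl, by simpa using h1, Or.inl h⟩
        · exact Or.inr ⟨hd, Or.inl rfl, by simpa using h1, Or.inr ⟨h2, h⟩⟩
        · exact Or.inr ⟨iw, Or.inr hiw, he, hq⟩
      · rintro (h | ⟨iw, (rfl | hiw), he, (hq | ⟨hc, hq⟩)⟩)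
        · exact Or.inl (Or.inl (Or.inl h))
        · exact Or.inl (Or.inl (Or.inr hq))
        · exact Or.inl (Or.inr hq)
        · exact Or.inr ⟨iw, hiw, he, Or.inl hq⟩
        · exact Or.inr ⟨iw, hiw, he, Or.inr ⟨hc, hq⟩⟩
    · rw [ih]
      simp only [List.mem_append, List.not_mem_nil, or_false, List.mem_cons, pvQ]
      constructor
      · rintro ((h | h) | ⟨iw, hiw, he, hq⟩)
        · exact Or.inl h
        · exact Or.inr ⟨hd, Or.inl rfl, by simpa using h1, Or.inl h⟩
        · exact Or.inr ⟨iw, Or.inr hiw, he, hq⟩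
      · rintro (h | ⟨iw, (rfl | hiw), he, (hq | ⟨hc, hq⟩)⟩)
        · exact Or.inl (Or.inl h)
        · exact Or.inl (Or.inr hq)
        · exact absurd hc (by simpa using h2)
        · exact Or.inr ⟨iw, hiw, he, Or.inl hq⟩
        · exact Or.inr ⟨iw, hiw, he, Or.inr ⟨hc, hq⟩⟩
    · rw [ih]
      simp only [List.mem_cons, pvQ]
      constructor
      · rintro (h | ⟨iw, hiw, he, hq⟩)
        · exact Or.inl h
        · exact Or.inr ⟨iw, Or.inr hiw, he, hq⟩
      · rintro (h | ⟨iw, (rfl | hiw), he, hq⟩)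
        · exact Or.inl h
        · exact absurd he (by simpa using h1)
        · exact Or.inr ⟨iw, hiw, he, hq⟩

-- membership in A's temp_words after the outer question_words-loop
lemma pv_memTempA (q : List String) (x : String) (qws : List String) (acc : List String) :
    (x ∈ qws.foldl (fun acc word =>
        (PySem.List.enumerate q).foldl (fun acc2 iw =>
          if iw.2 == word then
            let acc3 := acc2 ++ [iw.2]
            if iw.1 + 1 < (q.length : Int) && (PySem.Str.lower iw.2 == "what" || PySem.Str.lower iw.2 == "which") then
              acc3 ++ [PySem.List.pyGetD q (iw.1 + 1) ""]
            else acc3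
          else acc2) acc) acc)
    ↔ x ∈ acc ∨ ∃ word ∈ qws, ∃ iw ∈ PySem.List.enumerate q, iw.2 = word ∧ pvQ q iw x := by
  induction qws generalizing acc with
  | nil => simp
  | cons w ws ih =>
    simp only [List.foldl_cons]
    rw [ih, pv_memInnerA]
    simp only [List.mem_cons]
    constructor
    · rintro ((h | h) | ⟨word, hw, hrest⟩)
      · exact Or.inl h
      · exact Or.inr ⟨w, Or.inl rfl, h⟩
      · exact Or.inr ⟨word, Or.inr hw, hrest⟩
    · rintro (h | ⟨word, (rfl | hw), hrest⟩)
      · exact Or.inl (Or.inl h)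
      · exact Or.inl (Or.inr hrest)
      · exact Or.inr ⟨word, hw, hrest⟩

-- membership in B's to_remove set
lemma pv_memToRemoveB (q : List String) (x : String) (qws : List String) (l : List (Int × String)) (s : PySem.Set String) :
    (x ∈ l.foldl (fun s iw =>
        if qws.contains iw.2 then
          let s1 := PySem.Set.add s iw.2
          if iw.1 + 1 < (q.length : Int) && (PySem.Str.lower iw.2 == "what" || PySem.Str.lower iw.2 == "which") then
            PySem.Set.add s1 (PySem.List.pyGetD q (iw.1 + 1) "")
          else s1
        else s) s)
    ↔ x ∈ s ∨ ∃ iw ∈ l, iw.2 ∈ qws ∧ pvQ q iw x := by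
  induction l generalizing s with
  | nil => simp
  | cons hd tl ih =>
    simp only [List.foldl_cons]
    split_ifs with h1 h2
    · rw [ih]
      simp only [PySem.Set.mem_add, List.mem_cons, pvQ]
      constructor
      · rintro (((h | h) | h) | ⟨iw, hiw, he, hq⟩)
        · exact Or.inl h
        · exact Or.inr ⟨hd, Or.inl rfl, by simpa using h1, Or.inl h⟩
        · exact Or.inr ⟨hd, Or.inl rfl, by simpa using h1, Or.inr ⟨h2, h⟩⟩
        · exact Or.inr ⟨iw, Or.inr hiw, he, hq⟩
      · rintro (h | ⟨iw, (rfl | hiw), he, (hq | ⟨hc, hq⟩)⟩)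
        · exact Or.inl (Or.inl (Or.inl h))
        · exact Or.inl (Or.inl (Or.inr hq))
        · exact Or.inl (Or.inr hq)
        · exact Or.inr ⟨iw, hiw, he, Or.inl hq⟩
        · exact Or.inr ⟨iw, hiw, he, Or.inr ⟨hc, hq⟩⟩
    · rw [ih]
      simp only [PySem.Set.mem_add, List.mem_cons, pvQ]
      constructor
      · rintro ((h | h) | ⟨iw, hiw, he, hq⟩)
        · exact Or.inl h
        · exact Or.inr ⟨hd, Or.inl rfl, by simpa using h1, Or.inl h⟩
        · exact Or.inr ⟨iw, Or.inr hiw, he, hq⟩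
      · rintro (h | ⟨iw, (rfl | hiw), he, (hq | ⟨hc, hq⟩)⟩)
        · exact Or.inl (Or.inl h)
        · exact Or.inl (Or.inr hq)
        · exact absurd hc (by simpa using h2)
        · exact Or.inr ⟨iw, hiw, he, Or.inl hq⟩
        · exact Or.inr ⟨iw, hiw, he, Or.inr ⟨hc, hq⟩⟩
    · rw [ih]
      simp only [List.mem_cons, pvQ]
      constructor
      · rintro (h | ⟨iw, hiw, he, hq⟩)
        · exact Or.inl h
        · exact Or.inr ⟨iw, Or.inr hiw, he, hq⟩
      · rintro (h | ⟨iw, (rfl | hiw), he, hq⟩)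
        · exact Or.inl h
        · exact absurd he (by simpa using h1)
        · exact Or.inr ⟨iw, hiw, he, hq⟩

-- A's second loop is a filter
lemma pv_loop2_filter (l : List String) (acc : List String) :
    l.foldl (fun acc i =>
        if (PySem.Chars.isupper (i.toList.headD ' ')) == false then
          if !(pvStopWords.contains i) then acc ++ [i] else acc
        else acc) acc
    = acc ++ l.filter (fun i => !(PySem.Chars.isupper (i.toList.headD ' ')) && !(pvStopWords.contains i)) := by
  induction l generalizing acc with
  | nil => simp
  | cons hd tl ih =>
    simp only [List.foldl_cons, List.filter_cons]
    by_cases h1 : PySem.Chars.isupper (hd.toList.headD ' ') = true <;>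
      by_cases h2 : hd ∈ pvStopWords <;>
        rw [ih] <;> simp_all

-- A's else-branch nested loops are a flatMap
lemma pv_else_flatMap (qw rw : List String) :
    qw.foldl (fun acc i =>
        rw.foldl (fun acc2 j => if PySem.Str.isIn (PySem.Str.lower j) i then acc2 ++ [i] else acc2) acc) []
    = qw.flatMap (fun w => (rw.filter (fun j => PySem.Str.isIn (PySem.Str.lower j) w)).map (fun _ => w)) := by
  have hb : ∀ (acc : List String) (i : String),
      rw.foldl (fun acc2 j => if PySem.Str.isIn (PySem.Str.lower j) i then acc2 ++ [i] else acc2) acc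
      = acc ++ (rw.filter (fun j => PySem.Str.isIn (PySem.Str.lower j) i)).map (fun _ => i) := by
    intro acc i
    exact PySem.List.foldl_append_if (fun j => PySem.Str.isIn (PySem.Str.lower j) i) (fun _ => i) rw acc
  calc qw.foldl (fun acc i =>
          rw.foldl (fun acc2 j => if PySem.Str.isIn (PySem.Str.lower j) i then acc2 ++ [i] else acc2) acc) []
      = qw.foldl (fun acc i => acc ++ (rw.filter (fun j => PySem.Str.isIn (PySem.Str.lower j) i)).map (fun _ => i)) [] := by
        apply PySem.List.foldl_congr_mem
        intro acc i _
        exact hb acc i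
    _ = _ := by
        simpa using PySem.List.foldl_append_eq_flatMap (fun w => (rw.filter (fun j => PySem.Str.isIn (PySem.Str.lower j) w)).map (fun _ => w)) qw []

-- the none-branch, for a generic split question q and question-word list qws
lemma pv_none_branch (q qws : List String) :
    PySem.Str.join " " ((q.filter (fun item => !(List.contains (qws.foldl (fun acc word =>
        (PySem.List.enumerate q).foldl (fun acc2 (iw : Int × String) =>
          if iw.2 == word then
            let acc3 := acc2 ++ [iw.2]
            if iw.1 + 1 < (q.length : Int) && (PySem.Str.lower iw.2 == "what" || PySem.Str.lower iw.2 == "which") then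
              acc3 ++ [PySem.List.pyGetD q (iw.1 + 1) ""]
            else acc3
          else acc2) acc) []) item))).foldl (fun acc i =>
      if (PySem.Chars.isupper (i.toList.headD ' ')) == false then
        if !(pvStopWords.contains i) then acc ++ [i] else acc
      else acc) [])
    = PySem.Str.join " " (q.filter (fun w =>
        !(PySem.Set.contains ((PySem.List.enumerate q).foldl (fun s (iw : Int × String) =>
          if qws.contains iw.2 then
            let s1 := PySem.Set.add s iw.2
            if iw.1 + 1 < (q.length : Int) && (PySem.Str.lower iw.2 == "what" || PySem.Str.lower iw.2 == "which") then
              PySem.Set.add s1 (PySem.List.pyGetD q (iw.1 + 1) "")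
            else s1
          else s) PySem.Set.empty) w) &&
        !(PySem.Chars.isupper (w.toList.headD ' ')) &&
        !(pvStopWords.contains w))) := by
  congr 1
  rw [pv_loop2_filter, List.nil_append, List.filter_filter]
  apply List.filter_congr
  intro x hx
  have hmem : (x ∈ qws.foldl (fun acc word =>
      (PySem.List.enumerate q).foldl (fun acc2 (iw : Int × String) =>
        if iw.2 == word then
          let acc3 := acc2 ++ [iw.2]
          if iw.1 + 1 < (q.length : Int) && (PySem.Str.lower iw.2 == "what" || PySem.Str.lower iw.2 == "which") then
            acc3 ++ [PySem.List.pyGetD q (iw.1 + 1) ""]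
          else acc3
        else acc2) acc) [])
      ↔ (x ∈ (PySem.List.enumerate q).foldl (fun s (iw : Int × String) =>
        if qws.contains iw.2 then
          let s1 := PySem.Set.add s iw.2
          if iw.1 + 1 < (q.length : Int) && (PySem.Str.lower iw.2 == "what" || PySem.Str.lower iw.2 == "which") then
            PySem.Set.add s1 (PySem.List.pyGetD q (iw.1 + 1) "")
          else s1
        else s) PySem.Set.empty) := by
    rw [pv_memTempA, pv_memToRemoveB]
    simp only [PySem.Set.empty, List.not_mem_nil, false_or]
    constructor
    · rintro ⟨word, hw, iw, hiw, rfl, hq⟩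
      exact ⟨iw, hiw, hw, hq⟩
    · rintro ⟨iw, hiw, hw, hq⟩
      exact ⟨iw.2, hw, iw, hiw, rfl, hq⟩
  have hc : List.contains (qws.foldl (fun acc word =>
      (PySem.List.enumerate q).foldl (fun acc2 (iw : Int × String) =>
        if iw.2 == word then
          let acc3 := acc2 ++ [iw.2]
          if iw.1 + 1 < (q.length : Int) && (PySem.Str.lower iw.2 == "what" || PySem.Str.lower iw.2 == "which") then
            acc3 ++ [PySem.List.pyGetD q (iw.1 + 1) ""]
          else acc3
        else acc2) acc) []) x
      = PySem.Set.contains ((PySem.List.enumerate q).foldl (fun s (iw : Int × String) =>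
        if qws.contains iw.2 then
          let s1 := PySem.Set.add s iw.2
          if iw.1 + 1 < (q.length : Int) && (PySem.Str.lower iw.2 == "what" || PySem.Str.lower iw.2 == "which") then
            PySem.Set.add s1 (PySem.List.pyGetD q (iw.1 + 1) "")
          else s1
        else s) PySem.Set.empty) x := by
    apply Bool.eq_iff_iff.mpr
    rw [List.contains_iff_mem, PySem.Set.contains_iff]
    exact hmem
  rw [hc]
  cases PySem.Set.contains _ x <;> cases PySem.Chars.isupper (x.toList.headD ' ') <;>
    cases pvStopWords.contains x <;> rfl

-- ===== VERDICT (by name: the statement is the Claim_ definition above) =====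
theorem remove_stopwords_and_NER_line_spec : Claim_equal_remove_stopwords_and_NER_line := by
  intro question relevant_words question_words _
  unfold Spec_remove_stopwords_and_NER_line remove_stopwords_and_NER_line remove_stopwords_and_NER_line_alt
  cases relevant_words with
  | some rw => exact congrArg (PySem.Str.join " ") (pv_else_flatMap (PySem.Str.split₀ question) rw)
  | none =>
    cases question_words with
    | none => exact pv_none_branch (PySem.Str.split₀ question) pvQuestionWordsGlobal
    | some l => exact pv_none_branch (PySem.Str.split₀ question) l
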